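-- pv_equiv track=rewrite | github.com/NR7KINGithub/Data_Structures | 2/Beautiful_Number.py | solve
-- ===== SOURCE A (Python) =====
-- from typing import List
--
-- def solve(N: int, A:  List[int]) -> int:
--     result  = 0
--     for i in range(N):
--         xor = 0
--         for j in range(A[i] + 1):
--             xor ^= j
--         if xor == 1:
--             result += 1
--
--     return result
-- ===== SOURCE B (Python) =====
-- from typing import List
--
-- def solve(N: int, A: List[int]) -> int:
--     # xor(0..x) == 1 exactly when x >= 0 and x % 4 == 1 (closed form, no inner loop)
--     return sum(1 for x in A[:max(N, 0)] if x >= 0 and x % 4 == 1)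
-- ===== Notes on version B (the rewrite author's own statement) =====
-- stated objective: faster
-- what changed: Replaces the inner XOR-accumulation loop over 0..A[i] with the closed form xor(0..x)==1 iff x>=0 and x%4==1, turning the scan into a single count over A[:N].
import Mathlib
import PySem

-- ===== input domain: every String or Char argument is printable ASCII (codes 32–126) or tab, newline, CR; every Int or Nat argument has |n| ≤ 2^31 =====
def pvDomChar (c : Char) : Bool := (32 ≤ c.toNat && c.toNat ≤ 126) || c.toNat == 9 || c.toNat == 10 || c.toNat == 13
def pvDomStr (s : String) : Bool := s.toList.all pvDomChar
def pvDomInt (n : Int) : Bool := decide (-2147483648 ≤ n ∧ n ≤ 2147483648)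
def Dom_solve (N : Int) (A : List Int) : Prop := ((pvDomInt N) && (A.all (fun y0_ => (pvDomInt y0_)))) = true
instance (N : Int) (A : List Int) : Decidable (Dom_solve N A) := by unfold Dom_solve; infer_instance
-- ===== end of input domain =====

-- B replaces A's inner XOR loop over 0..A[i] by the closed form xor(0..x)=1 ↔ x ≥ 0 ∧ x % 4 = 1,
-- counting in a single pass over A[:N] (objective: faster).

-- ===== PORT A =====
def solve (N : Int) (A : List Int) : Int :=
  (PySem.List.pyRange 0 N 1).foldl
    (fun result i =>
      if ((PySem.List.pyRange 0 (PySem.List.pyGetD A i 0 + 1) 1).foldl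
            (fun x j => PySem.Int.bxor x j) 0) = 1
      then result + 1 else result) 0

-- ===== PORT B =====
def solve_alt (N : Int) (A : List Int) : Int :=
  (PySem.List.slice A none (some (max N 0))).foldl
    (fun s x => if 0 ≤ x ∧ PySem.Int.mod x 4 = 1 then s + 1 else s) 0

-- ===== PRECONDITION & SPEC =====
-- Pre_ excludes exactly the inputs where Python A raises IndexError: N larger than len(A).
def Pre_solve (N : Int) (A : List Int) : Prop := N ≤ (A.length : Int)
instance (N : Int) (A : List Int) : Decidable (Pre_solve N A) := by unfold Pre_solve; infer_instance

def pvWitness_solve : Int × List Int := (2, [1, 5])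

def Spec_solve (N : Int) (A : List Int) (out : Int) : Prop := out = solve_alt N A
instance (N : Int) (A : List Int) (out : Int) : Decidable (Spec_solve N A out) := by unfold Spec_solve; infer_instance

-- ===== CLAIM (what is proved, stated in full; the proofs are below) =====
def Claim_equal_solve : Prop := ∀ (N : Int) (A : List Int), Dom_solve N A → Pre_solve N A → Spec_solve N A (solve N A)

-- ===== LEMMAS AND PROOFS =====

-- cumulative xor 0 ^ 1 ^ … ^ m as a Nat, in closed form
def cfN (m : Nat) : Nat :=
  if m % 4 = 0 then m else if m % 4 = 1 then 1 else if m % 4 = 2 then m + 1 else 0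

theorem nat_xor_one_of_even (n : Nat) (h : n % 2 = 0) : n ^^^ 1 = n + 1 := by
  apply Nat.eq_of_testBit_eq
  intro i
  rw [Nat.testBit_xor]
  cases i with
  | zero =>
      simp only [Nat.testBit_zero]
      have h2 : (n + 1) % 2 = 1 := by omega
      simp [h, h2]
  | succ j =>
      rw [Nat.testBit_succ, Nat.testBit_succ, Nat.testBit_succ]
      have e : (n + 1) / 2 = n / 2 := by omega
      have e1 : (1 : Nat) / 2 = 0 := by norm_num
      rw [e, e1]
      simp

theorem cfN_step (k : Nat) : cfN k ^^^ (k + 1) = cfN (k + 1) := by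
  have h4 : k % 4 = 0 ∨ k % 4 = 1 ∨ k % 4 = 2 ∨ k % 4 = 3 := by omega
  rcases h4 with h | h | h | h
  · have h1 : (k + 1) % 4 = 1 := by omega
    simp only [cfN, h, h1]
    norm_num
    rw [← nat_xor_one_of_even k (by omega)]
    simp
  · have h1 : (k + 1) % 4 = 2 := by omega
    simp only [cfN, h, h1]
    norm_num
    rw [Nat.xor_comm, nat_xor_one_of_even (k + 1) (by omega)]
  · have h1 : (k + 1) % 4 = 3 := by omega
    simp only [cfN, h, h1]
    norm_num
  · have h1 : (k + 1) % 4 = 0 := by omega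
    simp only [cfN, h, h1]
    norm_num

theorem xorUpTo_natCast (m : Nat) :
    (PySem.List.pyRange 0 ((m : Int) + 1) 1).foldl (fun x j => PySem.Int.bxor x j) 0
      = ((cfN m : Nat) : Int) := by
  induction m with
  | zero => decide
  | succ k ih =>
      have hc : ((k + 1 : Nat) : Int) + 1 = ((k : Int) + 1) + 1 := by push_cast; ring
      rw [hc, PySem.List.pyRange_one_succ_right (by positivity), List.foldl_append, ih]
      simp only [List.foldl_cons, List.foldl_nil]
      have : ((k : Int) + 1) = ((k + 1 : Nat) : Int) := by push_cast; ring
      rw [this, PySem.Int.bxor_natCast, cfN_step]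

theorem cond_iff (x : Int) :
    ((PySem.List.pyRange 0 (x + 1) 1).foldl (fun a j => PySem.Int.bxor a j) 0 = 1)
      ↔ (0 ≤ x ∧ PySem.Int.mod x 4 = 1) := by
  by_cases hx : 0 ≤ x
  · obtain ⟨m, rfl⟩ := Int.eq_ofNat_of_zero_le hx
    rw [xorUpTo_natCast]
    have hm : PySem.Int.mod (m : Int) 4 = ((m % 4 : Nat) : Int) := by
      exact_mod_cast PySem.Int.mod_natCast m 4
    rw [hm]
    simp only [cfN]
    constructor
    · intro h
      split_ifs at h with h0 h1 h2 <;> push_cast at h ⊢ <;> omega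
    · rintro ⟨-, h⟩
      have h1 : m % 4 = 1 := by exact_mod_cast h
      simp [h1]
  · rw [PySem.List.pyRange_one_eq_nil (by omega)]
    simp only [List.foldl_nil]
    constructor
    · intro h; exact absurd h (by norm_num)
    · rintro ⟨h0, -⟩; exact absurd h0 hx

theorem map_pyGetD_range_take (N : Int) (A : List Int)
    (hlen : N ≤ (A.length : Int)) :
    (PySem.List.pyRange 0 N 1).map (fun j => PySem.List.pyGetD A j 0) = A.take N.toNat := by
  apply List.ext_getElem
  · simp [PySem.List.length_pyRange_one]
    omega
  · intro k h1 h2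
    simp only [List.getElem_map, PySem.List.getElem_pyRange_one, zero_add]
    have hk : k < A.length := by
      simp [List.length_take] at h2; omega
    rw [PySem.List.pyGetD_natCast]
    simp [List.getElem_take, List.getD_eq_getElem?_getD, hk]

theorem solve_eq_alt (N : Int) (A : List Int) (hpre : N ≤ (A.length : Int)) :
    solve N A = solve_alt N A := by
  unfold solve solve_alt
  by_cases hN : 0 ≤ N
  · have hmax : max N 0 = N := by omega
    have hmap := List.foldl_map (f := fun j => PySem.List.pyGetD A j 0)
      (g := fun r x =>
        if ((PySem.List.pyRange 0 (x + 1) 1).foldl (fun a j => PySem.Int.bxor a j) 0) = 1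
        then r + 1 else r)
      (l := PySem.List.pyRange 0 N 1) (init := (0 : Int))
    rw [hmax, PySem.List.slice_to A hN, ← hmap, map_pyGetD_range_take N A hpre]
    apply PySem.List.foldl_congr_mem
    intro r x _
    exact if_congr (cond_iff x) rfl rfl
  · have hmax : max N 0 = 0 := by omega
    rw [hmax, PySem.List.pyRange_one_eq_nil (by omega), PySem.List.slice_to A (by norm_num)]
    simp

-- ===== VERDICT (by name: the statement is the Claim_ definition above) =====
theorem solve_spec : Claim_equal_solve := by
  intro N A _ hpre
  unfold Spec_solve
  exact solve_eq_alt N A hpre
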